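-- pv_equiv track=rewrite | github.com/Wizgla/wizdan | cw2/zad4.py | zad8
-- ===== SOURCE A (Python) =====
-- def zad8(text):
--     listaliczb = []
--     count = [0,0]
--     suma = 0
--     flag = False
--     j = 0
--     for i in text:
--         j+=1
--         if i.isdigit() == True and flag == False :
--             count[0] = j-1
--             flag = True
--         if (i.isdigit() == False) and (flag == True):
--             count[1] = j-1
--             flag = False
--             listaliczb.append(text[count[0]:count[1]])
--     for i in listaliczb:
--         suma += int(i)
--
--     return listaliczb,suma
-- ===== SOURCE B (Python) =====
-- def zad8(text):
--     # Collect each digit run in a character buffer; a run is emitted when a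
--     # non-digit terminates it (like A, a run still open at end-of-text is not
--     # emitted), then sum the collected numbers.
--     listaliczb = []
--     cur = ""
--     for ch in text:
--         if ch.isdigit():
--             cur += ch
--         else:
--             if cur:
--                 listaliczb.append(cur)
--             cur = ""
--     return listaliczb, sum(int(x) for x in listaliczb)
-- ===== Notes on version B (the rewrite author's own statement) =====
-- stated objective: simpler
-- what changed: B accumulates the current digit run in a string buffer and appends it when a non-digit terminates it, instead of A's start/end index bookkeeping (count array, flag, manual position counter) with slicing of the original text; like A, it does not emit a run still open at end-of-text.
import Mathlib
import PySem

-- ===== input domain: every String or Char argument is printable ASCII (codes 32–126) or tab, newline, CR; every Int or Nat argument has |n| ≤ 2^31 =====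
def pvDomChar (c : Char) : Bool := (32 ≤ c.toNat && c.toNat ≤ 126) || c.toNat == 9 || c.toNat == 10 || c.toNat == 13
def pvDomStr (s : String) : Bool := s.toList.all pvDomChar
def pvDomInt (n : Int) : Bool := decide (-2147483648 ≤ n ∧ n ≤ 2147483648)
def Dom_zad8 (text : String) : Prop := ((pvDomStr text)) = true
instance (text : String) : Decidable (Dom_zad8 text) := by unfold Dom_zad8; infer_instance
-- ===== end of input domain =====

-- B accumulates each digit run in a character buffer instead of A's start/end index
-- bookkeeping (count array, flag, manual position counter) with slicing of the text;
-- same return value, including that a run still open at end-of-text is not emitted.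

-- ===== PORT A =====
-- loop state: (listaliczb, count[0], count[1], flag, j)
def zad8_loop (text : String) :
    List Char → List String × Int × Int × Bool × Int → List String × Int × Int × Bool × Int
  | [], st => st
  | i :: rest, (lst, c0, c1, flag, j) =>
    let j' := j + 1
    let p := if PySem.Chars.isdigit i && !flag then (j' - 1, true) else (c0, flag)
    if !(PySem.Chars.isdigit i) && p.2 then
      zad8_loop text rest
        (lst ++ [PySem.Str.slice text (some p.1) (some (j' - 1))], p.1, j' - 1, false, j')
    else
      zad8_loop text rest (lst, p.1, c1, p.2, j')

def zad8 (text : String) : List String × Int :=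
  let st := zad8_loop text text.toList ([], 0, 0, false, 0)
  let listaliczb := st.1
  -- int(i): every appended slice is a nonempty run of ASCII digits, so int() never raises;
  -- ofStr? is some there and the .getD 0 default is never used
  (listaliczb, listaliczb.foldl (fun suma i => suma + (PySem.Int.ofStr? i).getD 0) 0)

-- ===== PORT B =====
-- loop state: (listaliczb, cur); the Python str buffer cur is ported as its List Char
-- of code points (cur += ch is cur ++ [ch]), exact on this domain
def zad8_alt_loop : List Char → List String × List Char → List String × List Char
  | [], st => st
  | ch :: rest, (lst, cur) =>
    if PySem.Chars.isdigit ch then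
      zad8_alt_loop rest (lst, cur ++ [ch])
    else
      zad8_alt_loop rest ((if cur.isEmpty then lst else lst ++ [String.ofList cur]), [])

def zad8_alt (text : String) : List String × Int :=
  let st := zad8_alt_loop text.toList ([], [])
  let listaliczb := st.1
  (listaliczb, listaliczb.foldl (fun suma x => suma + (PySem.Int.ofStr? x).getD 0) 0)

-- ===== PRECONDITION & SPEC =====
def Spec_zad8 (text : String) (out : List String × Int) : Prop := out = zad8_alt text
instance (text : String) (out : List String × Int) : Decidable (Spec_zad8 text out) := by
  unfold Spec_zad8; infer_instance

-- ===== CLAIM (what is proved, stated in full; the proofs are below) =====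
def Claim_equal_zad8 : Prop := ∀ (text : String), Dom_zad8 text → Spec_zad8 text (zad8 text)

-- ===== LEMMAS AND PROOFS =====

-- the two loops agree on the collected list: when A's flag is set, count[0] marks where the
-- run started, and the characters consumed since then are exactly B's buffer cur
lemma alt_eq_loop (text : String) (rest : List Char) :
    ∀ (pre : List Char) (lst : List String) (c0 c1 : Int) (flag : Bool) (cur : List Char),
      text.toList = pre ++ rest →
      (flag = true → ∃ k : Nat, c0 = (k : Int) ∧ k ≤ pre.length ∧ pre.drop k = cur ∧ cur ≠ []) →
      (flag = false → cur = []) →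
      (zad8_alt_loop rest (lst, cur)).1
        = (zad8_loop text rest (lst, c0, c1, flag, (pre.length : Int))).1 := by
  induction rest with
  | nil => intro pre lst c0 c1 flag cur _ _ _; rfl
  | cons i rs ih =>
    intro pre lst c0 c1 flag cur htext hflagT hflagF
    by_cases hd : PySem.Chars.isdigit i = true
    · -- digit: B extends the buffer, A keeps/starts the run
      cases flag with
      | false =>
        have hcur := hflagF rfl; subst hcur
        simp only [zad8_alt_loop, zad8_loop, hd, Bool.not_false, Bool.and_true, Bool.not_true,
          Bool.false_and, if_true, if_false, List.nil_append]
        have hstep := ih (pre ++ [i]) lst ((pre.length : Int)) c1 true [i]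
          (by simpa using htext)
          (fun _ => ⟨pre.length, rfl, by simp, by simp, by simp⟩)
          (by simp)
        have hlen : ((pre ++ [i]).length : Int) = (pre.length : Int) + 1 := by simp
        rw [hlen] at hstep
        simpa using hstep
      | true =>
        obtain ⟨k, hc0, hk, hdrop, hcne⟩ := hflagT rfl
        simp only [zad8_alt_loop, zad8_loop, hd, Bool.not_true, Bool.and_false, Bool.false_and,
          if_false, if_true]
        have hstep := ih (pre ++ [i]) lst c0 c1 true (cur ++ [i])
          (by simpa using htext)
          (fun _ => ⟨k, hc0, by simp; omega,
            by rw [List.drop_append_of_le_length hk, hdrop], by simp⟩)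
          (by simp)
        have hlen : ((pre ++ [i]).length : Int) = (pre.length : Int) + 1 := by simp
        rw [hlen] at hstep
        simpa using hstep
    · -- non-digit: B flushes the buffer (if nonempty), A appends the slice (if flag)
      have hd' : PySem.Chars.isdigit i = false := by simpa using hd
      cases flag with
      | false =>
        have hcur := hflagF rfl; subst hcur
        simp only [zad8_alt_loop, zad8_loop, hd', Bool.false_and, if_false, Bool.not_false,
          Bool.and_false, List.isEmpty_nil, if_true]
        have hstep := ih (pre ++ [i]) lst c0 c1 false []
          (by simpa using htext) (by simp) (by simp)
        have hlen : ((pre ++ [i]).length : Int) = (pre.length : Int) + 1 := by simp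
        rw [hlen] at hstep
        simpa using hstep
      | true =>
        obtain ⟨k, hc0, hk, hdrop, hcne⟩ := hflagT rfl
        simp only [zad8_alt_loop, zad8_loop, hd', Bool.not_true, Bool.and_false, Bool.false_eq_true,
          if_false, Bool.not_false, Bool.and_true, if_true, List.isEmpty_eq_false_iff.mpr hcne,
          Bool.true_and, add_sub_cancel_right]
        have hslice :
            PySem.Str.slice text (some c0) (some ((pre.length : Nat) : Int))
              = String.ofList cur := by
          have h2 : (PySem.Str.slice text (some c0) (some ((pre.length : Nat) : Int))).toList
              = cur := by
            rw [PySem.Str.toList_slice, PySem.Chars.slice_eq_listSlice, hc0,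
              PySem.List.slice_natCast, htext, List.drop_append_of_le_length hk, hdrop]
            have : (cur ++ i :: rs).take (pre.length - k) = cur := by
              apply List.take_left'
              have := congrArg List.length hdrop
              simpa using this.symm
            simpa using this
          rw [← h2, String.ofList_toList]
        have hstep := ih (pre ++ [i]) (lst ++ [String.ofList cur]) c0
          ((pre.length : Int) + 1 - 1) false []
          (by simpa using htext) (by simp) (by simp)
        have hlen : ((pre ++ [i]).length : Int) = (pre.length : Int) + 1 := by simp
        rw [hlen] at hstep
        rw [hslice]
        simpa using hstep

-- ===== VERDICT (by name: the statement is the Claim_ definition above) =====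
theorem zad8_spec : Claim_equal_zad8 := by
  intro text _
  show zad8 text = zad8_alt text
  have hlst : (zad8_alt_loop text.toList ([], [])).1
      = (zad8_loop text text.toList ([], 0, 0, false, 0)).1 := by
    have h := alt_eq_loop text text.toList [] [] 0 0 false []
      (by simp) (by simp) (fun _ => rfl)
    simpa using h
  show (_, _) = (_, _)
  rw [hlst]
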